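-- pv_equiv track=rewrite | github.com/Iftimie/TruckMonitoringSystem | truckms/service_v2/p2pdata.py | merge_downloaded_data
-- ===== SOURCE A (Python) =====
-- def merge_downloaded_data(original_data, merging_data):
--     if not merging_data:
--         return {}
--     update_keys = merging_data[0].keys()
--     result_update = {}
--     for k in update_keys:
--         if "timestamp" in k:continue
--         if all(d[k] == original_data[k] for d in merging_data):
--             result_update[k] = max(merging_data, key=lambda d: d['timestamp'])[k]
--         else:
--             result_update[k] = max(merging_data, key=lambda d: d['timestamp'] if d[k] != original_data[k] else 0)[k]
--
--     return result_update
-- ===== SOURCE B (Python) =====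
-- def merge_downloaded_data(original_data, merging_data):
--     if not merging_data:
--         return {}
--     keys = [k for k in merging_data[0] if "timestamp" not in k]
--     best = {}
--     for d in merging_data:
--         for k in keys:
--             v = d[k]
--             score = d['timestamp'] if v != original_data[k] else 0
--             if k not in best or score > best[k][0]:
--                 best[k] = (score, v)
--     return {k: best[k][1] for k in keys}
-- ===== Notes on version B (the rewrite author's own statement) =====
-- stated objective: alternative
-- what changed: A decides per key between an all-equal branch and a max-by-score branch, scanning merging_data twice for every key (an all() pass plus a max() pass); B makes a single streaming pass over merging_data, maintaining per key the first maximal (score, value) pair in a dict and reading the result off at the end.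
import Mathlib
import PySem

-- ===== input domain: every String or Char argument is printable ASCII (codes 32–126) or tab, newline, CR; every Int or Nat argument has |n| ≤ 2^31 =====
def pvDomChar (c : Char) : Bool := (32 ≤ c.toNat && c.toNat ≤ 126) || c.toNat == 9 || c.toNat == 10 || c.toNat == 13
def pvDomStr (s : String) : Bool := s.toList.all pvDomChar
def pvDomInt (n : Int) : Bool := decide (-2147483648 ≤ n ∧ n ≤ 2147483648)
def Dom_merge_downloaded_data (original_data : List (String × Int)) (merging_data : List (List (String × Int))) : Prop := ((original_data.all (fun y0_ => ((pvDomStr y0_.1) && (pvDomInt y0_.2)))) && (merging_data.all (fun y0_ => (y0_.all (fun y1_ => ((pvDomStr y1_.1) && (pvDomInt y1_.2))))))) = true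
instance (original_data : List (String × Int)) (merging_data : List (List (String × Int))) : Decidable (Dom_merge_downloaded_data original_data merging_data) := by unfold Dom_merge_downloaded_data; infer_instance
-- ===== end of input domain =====

-- B replaces A's per-key passes (an all() scan plus a max() scan over merging_data for every key) by ONE streaming
-- pass over merging_data keeping, per key, the best (score, value) seen so far — an alternative decomposition.

-- ===== PORT A =====
def merge_downloaded_data (original_data : List (String × Int)) (merging_data : List (List (String × Int))) : List (String × Int) :=
  if merging_data = [] then []
  else
    let orig := PySem.Dict.mk original_data
    let mds := merging_data.map PySem.Dict.mk
    let update_keys := (PySem.Dict.mk merging_data.headI).keys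
    (update_keys.foldl (fun (res : PySem.Dict String Int) k =>
      if PySem.Str.isIn "timestamp" k then res
      else if mds.all (fun d => d.getD k 0 == orig.getD k 0) then
        res.insert k (((PySem.List.max? mds (fun d => d.getD "timestamp" 0)).getD PySem.Dict.empty).getD k 0)
      else
        res.insert k (((PySem.List.max? mds (fun d => if d.getD k 0 ≠ orig.getD k 0 then d.getD "timestamp" 0 else 0)).getD PySem.Dict.empty).getD k 0))
      PySem.Dict.empty).items

-- ===== PORT B =====
-- one step of B's inner loop: update the per-key best (score, value) with record d
def pvInner (orig d : PySem.Dict String Int) (best : PySem.Dict String (Int × Int)) (k : String) :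
    PySem.Dict String (Int × Int) :=
  let v := d.getD k 0
  let score := if v ≠ orig.getD k 0 then d.getD "timestamp" 0 else 0
  match best.get? k with
  | none => best.insert k (score, v)
  | some b => if score > b.1 then best.insert k (score, v) else best

def merge_downloaded_data_alt (original_data : List (String × Int)) (merging_data : List (List (String × Int))) : List (String × Int) :=
  if merging_data = [] then []
  else
    let orig := PySem.Dict.mk original_data
    let keys := ((PySem.Dict.mk merging_data.headI).keys).filter (fun k => !(PySem.Str.isIn "timestamp" k))
    let best := merging_data.foldl
      (fun best drec => keys.foldl (pvInner orig (PySem.Dict.mk drec)) best) PySem.Dict.empty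
    (keys.foldl (fun (res : PySem.Dict String Int) k => res.insert k (best.getD k (0, 0)).2) PySem.Dict.empty).items

-- ===== PRECONDITION & SPEC =====
-- Pre_ keeps dict-valid inputs (distinct keys per association list — duplicate keys cannot arise from the Python
-- dicts A takes, so such lists do not represent any input of A) and excludes exactly the inputs on which A raises
-- KeyError: a non-timestamp key of merging_data[0] missing from original_data or from some record, or 'timestamp'
-- missing from a record whose key A's max() actually reads (every record in the all-equal branch, the records
-- disagreeing with original_data in the other branch).
def Pre_merge_downloaded_data (original_data : List (String × Int)) (merging_data : List (List (String × Int))) : Prop :=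
  (original_data.map Prod.fst).Nodup ∧
  (∀ r ∈ merging_data, (r.map Prod.fst).Nodup) ∧
  (∀ k ∈ (merging_data.headI.map Prod.fst).filter (fun k => !(PySem.Str.isIn "timestamp" k)),
     k ∈ original_data.map Prod.fst ∧ (∀ r ∈ merging_data, k ∈ r.map Prod.fst) ∧
     (if ∀ r ∈ merging_data, (PySem.Dict.mk r).getD k 0 = (PySem.Dict.mk original_data).getD k 0 then
        ∀ r ∈ merging_data, "timestamp" ∈ r.map Prod.fst
      else
        ∀ r ∈ merging_data, (PySem.Dict.mk r).getD k 0 ≠ (PySem.Dict.mk original_data).getD k 0 →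
          "timestamp" ∈ r.map Prod.fst))
instance (original_data : List (String × Int)) (merging_data : List (List (String × Int))) : Decidable (Pre_merge_downloaded_data original_data merging_data) := by unfold Pre_merge_downloaded_data; infer_instance

def pvWitness_merge_downloaded_data : (List (String × Int)) × (List (List (String × Int))) :=
  ([("a", 1)], [[("a", 2), ("timestamp", 5)], [("a", 3), ("timestamp", 7)]])

def Spec_merge_downloaded_data (original_data : List (String × Int)) (merging_data : List (List (String × Int))) (out : List (String × Int)) : Prop := out = merge_downloaded_data_alt original_data merging_data
instance (original_data : List (String × Int)) (merging_data : List (List (String × Int))) (out : List (String × Int)) : Decidable (Spec_merge_downloaded_data original_data merging_data out) := by unfold Spec_merge_downloaded_data; infer_instance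

-- ===== CLAIM (what is proved, stated in full; the proofs are below) =====
def Claim_equal_merge_downloaded_data : Prop := ∀ (original_data : List (String × Int)) (merging_data : List (List (String × Int))), Dom_merge_downloaded_data original_data merging_data → Pre_merge_downloaded_data original_data merging_data → Spec_merge_downloaded_data original_data merging_data (merge_downloaded_data original_data merging_data)

-- ===== LEMMAS AND PROOFS =====

-- score of record d for key k (A's max key in the not-all-equal branch)
def pvSc (orig d : PySem.Dict String Int) (k : String) : Int :=
  if d.getD k 0 ≠ orig.getD k 0 then d.getD "timestamp" 0 else 0

-- effect of one record on the per-key accumulator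
def pvStep (orig : PySem.Dict String Int) (k : String) (d : PySem.Dict String Int)
    (acc : Option (Int × Int)) : Option (Int × Int) :=
  match acc with
  | none => some (pvSc orig d k, d.getD k 0)
  | some b => if pvSc orig d k > b.1 then some (pvSc orig d k, d.getD k 0) else some b

-- Python max's running first-maximal fold, with key pvSc
def pvMaxStep (orig : PySem.Dict String Int) (k : String)
    (acc : Option (PySem.Dict String Int)) (x : PySem.Dict String Int) :
    Option (PySem.Dict String Int) :=
  match acc with
  | none => some x
  | some m => if pvSc orig m k < pvSc orig x k then some x else some m

-- A's loop, with the timestamp-keys skip turned into a filter and the branch pushed into the stored value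
theorem pv_skipA {ν : Type} (l : List String) (p c : String → Bool) (v1 v2 : String → ν)
    (init : PySem.Dict String ν) :
    l.foldl (fun res k => if p k then res
      else if c k then res.insert k (v1 k) else res.insert k (v2 k)) init
      = (l.filter (fun k => !p k)).foldl
          (fun res k => res.insert k (if c k then v1 k else v2 k)) init := by
  induction l generalizing init with
  | nil => rfl
  | cons x t ih =>
    by_cases hx : p x
    · simp [hx, ih]
    · by_cases hc : c x <;> simp [hx, hc, ih]

-- a fold inserting distinct keys into the empty dict lists them in order
theorem pv_items_fold_aux {ν : Type} (l : List String) (f : String → ν) :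
    ∀ d : PySem.Dict String ν, l.Nodup → (∀ k ∈ l, d.contains k = false) →
    (l.foldl (fun res k => res.insert k (f k)) d).items = d.items ++ l.map (fun k => (k, f k)) := by
  induction l with
  | nil => intro d _ _; simp
  | cons x t ih =>
    intro d hnd hfresh
    have hfresh' : ∀ k ∈ t, (d.insert x (f x)).contains k = false := by
      intro k hk
      have hne : k ≠ x := by rintro rfl; exact (List.nodup_cons.mp hnd).1 hk
      rw [PySem.Dict.contains_insert]
      simp [hne, hfresh k (List.mem_cons_of_mem _ hk)]
    rw [List.foldl_cons, ih _ (List.nodup_cons.mp hnd).2 hfresh',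
      PySem.Dict.items_insert_of_not_contains]
    · simp
    · exact hfresh x (List.mem_cons_self ..)

theorem pv_items_fold {ν : Type} (l : List String) (f : String → ν) (hnd : l.Nodup) :
    (l.foldl (fun res k => res.insert k (f k)) PySem.Dict.empty).items
      = l.map (fun k => (k, f k)) := by
  rw [pv_items_fold_aux l f _ hnd (by intro k _; rw [PySem.Dict.contains_empty])]
  rfl

-- one pvInner step seen through get? at another key
theorem pvInner_get?_ne (orig d : PySem.Dict String Int) (k0 k : String) (hne : k ≠ k0)
    (best : PySem.Dict String (Int × Int)) :
    (pvInner orig d best k0).get? k = best.get? k := by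
  have hsc : (if d.getD k0 0 ≠ orig.getD k0 0 then d.getD "timestamp" 0 else 0) = pvSc orig d k0 := rfl
  unfold pvInner
  simp only []
  rw [hsc]
  cases hb : best.get? k0 with
  | none =>
    show (best.insert k0 (pvSc orig d k0, d.getD k0 0)).get? k = best.get? k
    rw [PySem.Dict.get?_insert, if_neg hne]
  | some b =>
    show (if pvSc orig d k0 > b.1 then best.insert k0 (pvSc orig d k0, d.getD k0 0) else best).get? k
        = best.get? k
    split_ifs with h
    · rw [PySem.Dict.get?_insert, if_neg hne]
    · rfl

-- one pvInner step seen through get? at its own key is pvStep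
theorem pvInner_get?_self (orig d : PySem.Dict String Int) (k : String)
    (best : PySem.Dict String (Int × Int)) :
    (pvInner orig d best k).get? k = pvStep orig k d (best.get? k) := by
  have hsc : (if d.getD k 0 ≠ orig.getD k 0 then d.getD "timestamp" 0 else 0) = pvSc orig d k := rfl
  unfold pvInner pvStep
  simp only []
  rw [hsc]
  cases hb : best.get? k with
  | none => simp [PySem.Dict.get?_insert_self]
  | some b =>
    show (if pvSc orig d k > b.1 then best.insert k (pvSc orig d k, d.getD k 0) else best).get? k
        = if pvSc orig d k > b.1 then some (pvSc orig d k, d.getD k 0) else some b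
    split_ifs with h
    · simp [PySem.Dict.get?_insert_self]
    · exact hb

-- inner fold leaves keys outside the list untouched
theorem pvInner_fold_get?_not_mem (orig d : PySem.Dict String Int) (ks : List String)
    (k : String) :
    ∀ best : PySem.Dict String (Int × Int), k ∉ ks →
    (ks.foldl (pvInner orig d) best).get? k = best.get? k := by
  induction ks with
  | nil => intro best _; rfl
  | cons k0 t ih =>
    intro best hk
    have hne : k ≠ k0 := by rintro rfl; exact hk (List.mem_cons_self ..)
    have ht : k ∉ t := fun h => hk (List.mem_cons_of_mem _ h)
    rw [List.foldl_cons, ih _ ht, pvInner_get?_ne _ _ _ _ hne]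

-- inner fold acts on a key of the list exactly as pvStep
theorem pvInner_fold_get?_mem (orig d : PySem.Dict String Int) (ks : List String)
    (k : String) :
    ∀ best : PySem.Dict String (Int × Int), ks.Nodup → k ∈ ks →
    (ks.foldl (pvInner orig d) best).get? k = pvStep orig k d (best.get? k) := by
  induction ks with
  | nil => intro _ _ hk; cases hk
  | cons k0 t ih =>
    intro best hnd hk
    rw [List.foldl_cons]
    rcases List.mem_cons.mp hk with rfl | hkt
    · have hkt : k ∉ t := (List.nodup_cons.mp hnd).1
      rw [pvInner_fold_get?_not_mem _ _ _ _ _ hkt, pvInner_get?_self]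
    · have hne : k ≠ k0 := by
        rintro rfl; exact (List.nodup_cons.mp hnd).1 hkt
      rw [ih _ (List.nodup_cons.mp hnd).2 hkt, pvInner_get?_ne _ _ _ _ hne]

-- outer fold: the per-key accumulator evolves by pvStep along the records
theorem pv_outer_fold (orig : PySem.Dict String Int) (ks : List String) (k : String)
    (hnd : ks.Nodup) (hk : k ∈ ks) (md : List (List (String × Int))) :
    ∀ best : PySem.Dict String (Int × Int),
    (md.foldl (fun b r => ks.foldl (pvInner orig (PySem.Dict.mk r)) b) best).get? k
      = md.foldl (fun acc r => pvStep orig k (PySem.Dict.mk r) acc) (best.get? k) := by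
  induction md with
  | nil => intro best; rfl
  | cons r t ih =>
    intro best
    rw [List.foldl_cons, List.foldl_cons, ih, pvInner_fold_get?_mem _ _ _ _ _ hnd hk]

-- the pvStep stream is the (score, value) image of the first-maximal fold
theorem pv_step_argmax_aux (orig : PySem.Dict String Int) (k : String)
    (mds : List (PySem.Dict String Int)) :
    ∀ o : Option (PySem.Dict String Int),
    mds.foldl (fun acc d => pvStep orig k d acc) (o.map (fun d => (pvSc orig d k, d.getD k 0)))
      = (mds.foldl (pvMaxStep orig k) o).map (fun d => (pvSc orig d k, d.getD k 0)) := by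
  induction mds with
  | nil => intro o; rfl
  | cons d t ih =>
    intro o
    rw [List.foldl_cons, List.foldl_cons]
    cases o with
    | none => exact ih (some d)
    | some m =>
      have h1 : pvStep orig k d (Option.map (fun d => (pvSc orig d k, d.getD k 0)) (some m))
          = Option.map (fun d => (pvSc orig d k, d.getD k 0))
              (if pvSc orig m k < pvSc orig d k then some d else some m) := by
        unfold pvStep
        by_cases hc : pvSc orig m k < pvSc orig d k <;> simp [gt_iff_lt, hc]
      rw [h1]
      have h2 : pvMaxStep orig k (some m) d
          = if pvSc orig m k < pvSc orig d k then some d else some m := rfl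
      rw [h2]
      exact ih _

theorem pv_max?_eq_fold (orig : PySem.Dict String Int) (k : String)
    (mds : List (PySem.Dict String Int)) :
    PySem.List.max? mds (fun d => pvSc orig d k) = mds.foldl (pvMaxStep orig k) none := by
  unfold PySem.List.max? pvMaxStep
  congr 1
  funext acc x
  cases acc <;> rfl

-- per-key: B's streamed best value equals A's branchy all/max value
theorem pv_value_eq (orig : PySem.Dict String Int) (k : String)
    (md : List (List (String × Int))) (hne : md ≠ []) :
    ((md.foldl (fun acc r => pvStep orig k (PySem.Dict.mk r) acc) none).getD (0, 0)).2
      = (if (md.map PySem.Dict.mk).all (fun d => d.getD k 0 == orig.getD k 0) then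
          ((PySem.List.max? (md.map PySem.Dict.mk) (fun d => d.getD "timestamp" 0)).getD PySem.Dict.empty).getD k 0
        else
          ((PySem.List.max? (md.map PySem.Dict.mk) (fun d => if d.getD k 0 ≠ orig.getD k 0 then d.getD "timestamp" 0 else 0)).getD PySem.Dict.empty).getD k 0) := by
  have hmape : md.map PySem.Dict.mk ≠ [] := by simpa using hne
  obtain ⟨m, hm⟩ : ∃ m, PySem.List.max? (md.map PySem.Dict.mk) (fun d => pvSc orig d k) = some m := by
    cases h : PySem.List.max? (md.map PySem.Dict.mk) (fun d => pvSc orig d k) with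
    | none => rw [PySem.List.max?_eq_none_iff] at h; exact absurd h hmape
    | some m => exact ⟨m, rfl⟩
  have hmem : m ∈ md.map PySem.Dict.mk := PySem.List.max?_mem hm
  have hstream : md.foldl (fun acc r => pvStep orig k (PySem.Dict.mk r) acc) none
      = some (pvSc orig m k, m.getD k 0) := by
    have haux := pv_step_argmax_aux orig k (md.map PySem.Dict.mk) none
    rw [List.foldl_map,
      show (Option.map (fun d => (pvSc orig d k, d.getD k 0)) (none : Option (PySem.Dict String Int))) = none from rfl] at haux
    rw [haux, ← pv_max?_eq_fold, hm]
    rfl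
  rw [hstream]
  simp only [Option.getD_some]
  split
  case isTrue hall =>
    obtain ⟨m2, hm2⟩ : ∃ m2, PySem.List.max? (md.map PySem.Dict.mk) (fun d => d.getD "timestamp" 0) = some m2 := by
      cases h : PySem.List.max? (md.map PySem.Dict.mk) (fun d => d.getD "timestamp" 0) with
      | none => rw [PySem.List.max?_eq_none_iff] at h; exact absurd h hmape
      | some m2 => exact ⟨m2, rfl⟩
    have hmem2 : m2 ∈ md.map PySem.Dict.mk := PySem.List.max?_mem hm2
    have hv : ∀ d ∈ md.map PySem.Dict.mk, d.getD k 0 = orig.getD k 0 := by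
      intro d hd
      have := List.all_eq_true.mp hall d hd
      simpa using this
    rw [hm2]
    simp only [Option.getD_some]
    rw [hv m hmem, hv m2 hmem2]
  case isFalse hall =>
    have hm' := hm
    simp only [pvSc] at hm'
    rw [hm']
    simp only [Option.getD_some]

-- ===== VERDICT (by name: the statement is the Claim_ definition above) =====
theorem merge_downloaded_data_spec : Claim_equal_merge_downloaded_data := by
  intro o md hdom hpre
  unfold Spec_merge_downloaded_data merge_downloaded_data merge_downloaded_data_alt
  cases md with
  | nil => rfl
  | cons d0 rest =>
    obtain ⟨hndo, hndr, hkeys⟩ := hpre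
    rw [if_neg (List.cons_ne_nil d0 rest), if_neg (List.cons_ne_nil d0 rest)]
    simp only [List.headI_cons, PySem.Dict.keys_mk]
    have hndfk : (List.filter (fun k => !PySem.Str.isIn "timestamp" k)
        (List.map (fun (x : String × Int) => x.1) d0)).Nodup :=
      ((hndr d0 (List.mem_cons_self ..)).filter _)
    rw [pv_skipA]
    rw [pv_items_fold _ _ hndfk, pv_items_fold _ _ hndfk]
    apply List.map_congr_left
    intro k hk
    congr 1
    have hval := pv_value_eq (PySem.Dict.mk o) k (d0 :: rest) (List.cons_ne_nil d0 rest)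
    rw [← hval]
    have hget : ((d0 :: rest).foldl
        (fun best drec => List.foldl (pvInner (PySem.Dict.mk o) (PySem.Dict.mk drec)) best
          (List.filter (fun k => !PySem.Str.isIn "timestamp" k)
            (List.map (fun (x : String × Int) => x.1) d0)))
        PySem.Dict.empty).get? k
        = (d0 :: rest).foldl (fun acc r => pvStep (PySem.Dict.mk o) k (PySem.Dict.mk r) acc) none := by
      rw [pv_outer_fold (PySem.Dict.mk o) _ k hndfk hk (d0 :: rest) PySem.Dict.empty]
      rfl
    rw [PySem.Dict.getD_eq_get?_getD, hget]
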